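-- pv_equiv track=rewrite | github.com/B20DCCN728/Python_PTIT | Kiem_Tra_So_Dep.py | check
-- ===== SOURCE A (Python) =====
-- def check(S):
--     n = len(S)
--     if S[0] != S[1]:
--         if n == 2: return True
--         else:
--             for i in range(2, n):
--                 if S[i] != S[i - 2]: return False
--             return True
--     else: return False
-- ===== SOURCE B (Python) =====
-- def check(S):
--     a, b = S[0], S[1]
--     n = len(S)
--     pattern = (a + b) * ((n + 1) // 2)
--     return a != b and S == pattern[:n]
-- ===== Notes on version B (the rewrite author's own statement) =====
-- stated objective: simpler
-- what changed: Instead of scanning and comparing each S[i] with S[i-2], B constructs the expected alternating string (S[0]+S[1]) repeated ceil(n/2) times and returns whether S equals its n-prefix (with the S[0]!=S[1] gate): a construct-and-compare against the period-2 prototype rather than a pairwise backward scan.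
import Mathlib
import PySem

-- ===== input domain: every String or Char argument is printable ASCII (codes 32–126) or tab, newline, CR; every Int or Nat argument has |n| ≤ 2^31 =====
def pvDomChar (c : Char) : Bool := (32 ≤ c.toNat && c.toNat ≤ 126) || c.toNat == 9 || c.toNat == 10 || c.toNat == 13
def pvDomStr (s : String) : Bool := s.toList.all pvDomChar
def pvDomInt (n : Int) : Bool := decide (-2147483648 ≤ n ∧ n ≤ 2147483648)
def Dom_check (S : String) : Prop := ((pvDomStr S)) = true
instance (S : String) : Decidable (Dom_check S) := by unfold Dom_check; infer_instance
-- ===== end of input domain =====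

-- B builds the expected period-2 prototype (S[0]+S[1])*ceil(n/2) and compares S to its n-prefix instead of A's backward index scan (simpler); both raise IndexError for len(S) < 2, excluded by Pre_check.


-- ===== PORT A =====
-- the 'for i in range(2, n)' loop with early return False
def checkLoop (cs : List Char) : List Int → Bool
  | [] => true
  | i :: rest =>
      if PySem.List.pyGetD cs i ' ' ≠ PySem.List.pyGetD cs (i - 2) ' ' then false
      else checkLoop cs rest

def check (S : String) : Bool :=
  let cs := S.toList
  let n := PySem.List.len cs
  if PySem.List.pyGetD cs 0 ' ' ≠ PySem.List.pyGetD cs 1 ' ' then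
    if n = 2 then true
    else checkLoop cs (PySem.List.pyRange 2 n 1)
  else false

-- ===== PORT B =====
-- (a + b) * ((n + 1) // 2) is string repetition: flatten of (n+1)//2 copies of [a, b]
-- (.toNat is exact: (n+1)//2 ≥ 0 since n = len(S) ≥ 0)
def check_alt (S : String) : Bool :=
  let cs := S.toList
  let a := PySem.List.pyGetD cs 0 ' '
  let b := PySem.List.pyGetD cs 1 ' '
  let n := PySem.List.len cs
  let pattern := List.flatten (List.replicate (PySem.Int.floordiv (n + 1) 2).toNat [a, b])
  a != b && (cs == PySem.List.slice pattern none (some n))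

-- ===== PRECONDITION & SPEC =====
-- Pre_ excludes strings of length < 2, on which both Pythons raise IndexError (S[0]/S[1]).
def Pre_check (S : String) : Prop := 2 ≤ S.toList.length
instance (S : String) : Decidable (Pre_check S) := by unfold Pre_check; infer_instance
def pvWitness_check : String := "abab"
def Spec_check (S : String) (out : Bool) : Prop := out = check_alt S
instance (S : String) (out : Bool) : Decidable (Spec_check S out) := by unfold Spec_check; infer_instance

-- ===== CLAIM (what is proved, stated in full; the proofs are below) =====
def Claim_equal_check : Prop := ∀ (S : String), Dom_check S → Pre_check S → Spec_check S (check S)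

-- ===== LEMMAS AND PROOFS =====

lemma checkLoop_iff (cs : List Char) (l : List Int) :
    checkLoop cs l = true ↔
      ∀ i ∈ l, PySem.List.pyGetD cs i ' ' = PySem.List.pyGetD cs (i - 2) ' ' := by
  induction l with
  | nil => simp [checkLoop]
  | cons i rest ih =>
      by_cases h : PySem.List.pyGetD cs i ' ' = PySem.List.pyGetD cs (i - 2) ' '
      · simp [checkLoop, h, ih]
      · simp [checkLoop, h]

-- the prototype's character at index i is a for even i, b for odd i
lemma pat_getElem? (a b : Char) (k i : Nat) :
    (List.flatten (List.replicate k [a, b]))[i]? =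
      if i < 2 * k then some (if i % 2 = 0 then a else b) else none := by
  induction k generalizing i with
  | zero => simp
  | succ k ih =>
      rw [List.replicate_succ, List.flatten_cons]
      match i with
      | 0 => simp
      | 1 =>
          rw [if_pos (by omega)]
          rfl
      | (j + 2) =>
          have hx : ([a, b] ++ List.flatten (List.replicate k [a, b]))[j + 2]? =
              (List.flatten (List.replicate k [a, b]))[j]? := rfl
          rw [hx, ih]
          have hm : (j + 2) % 2 = j % 2 := by omega
          rw [hm]
          by_cases hj : j < 2 * k
          · rw [if_pos hj, if_pos (show j + 2 < 2 * (k + 1) by omega)]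
          · rw [if_neg hj, if_neg (show ¬ (j + 2 < 2 * (k + 1)) by omega)]

-- A's period-2 backward condition iff each char equals the parity prototype
lemma period_iff_parity (cs : List Char) (a b : Char) (_h2 : 2 ≤ cs.length)
    (ha : cs[0]? = some a) (hb : cs[1]? = some b) :
    (∀ i : Nat, 2 ≤ i → i < cs.length → cs[i]? = cs[i - 2]?) ↔
    (∀ i : Nat, i < cs.length → cs[i]? = some (if i % 2 = 0 then a else b)) := by
  constructor
  · intro hp i
    induction i using Nat.strong_induction_on with
    | _ i ih =>
        intro hi
        match i with
        | 0 => simpa using ha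
        | 1 => simpa using hb
        | (j + 2) =>
            have h1 := hp (j + 2) (by omega) hi
            have h2' := ih j (by omega) (by omega)
            have hm : (j + 2) % 2 = j % 2 := by omega
            rw [hm]
            simpa [h2'] using h1
  · intro hq i h2i hi
    have hA := hq i hi
    have hB := hq (i - 2) (by omega)
    have hm : (i - 2) % 2 = i % 2 := by omega
    rw [hA, hB, hm]

-- under the S[0] != S[1] gate, A's body equals B's prefix comparison
lemma body_eq (cs : List Char) (h2 : 2 ≤ cs.length) :
    (if PySem.List.len cs = 2 then true
     else checkLoop cs (PySem.List.pyRange 2 (PySem.List.len cs) 1)) =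
    (cs == PySem.List.slice
        (List.flatten (List.replicate (PySem.Int.floordiv (PySem.List.len cs + 1) 2).toNat
          [PySem.List.pyGetD cs 0 ' ', PySem.List.pyGetD cs 1 ' ']))
        none (some (PySem.List.len cs))) := by
  set a := PySem.List.pyGetD cs 0 ' ' with ha
  set b := PySem.List.pyGetD cs 1 ' ' with hb
  have hlen : PySem.List.len cs = (cs.length : Int) := PySem.List.len_eq cs
  have ha' : cs[0]? = some a := by
    rw [ha, PySem.List.pyGetD_eq_getElem cs ' ' (by norm_num) (by omega)]
    rw [List.getElem?_eq_getElem (show (0 : Nat) < cs.length by omega)]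
    exact congrArg some (getElem_congr_idx (by omega))
  have hb' : cs[1]? = some b := by
    rw [hb, PySem.List.pyGetD_eq_getElem cs ' ' (by norm_num) (by omega)]
    rw [List.getElem?_eq_getElem (show (1 : Nat) < cs.length by omega)]
    exact congrArg some (getElem_congr_idx (by omega))
  -- the repetition count: k = (length + 1) / 2, so length ≤ 2 * k
  have hk : (PySem.Int.floordiv (PySem.List.len cs + 1) 2).toNat = (cs.length + 1) / 2 := by
    rw [hlen]
    have h1 : ((cs.length : Int) + 1) = ((cs.length + 1 : Nat) : Int) := by push_cast; ring
    rw [h1, show ((2 : Int)) = ((2 : Nat) : Int) from rfl, PySem.Int.floordiv_natCast]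
    exact Int.toNat_natCast _
  set k := (cs.length + 1) / 2 with hkdef
  have h2k : cs.length ≤ 2 * k := by omega
  -- the slice is a take
  have hslice : PySem.List.slice (List.flatten (List.replicate k [a, b])) none
      (some (PySem.List.len cs)) = (List.flatten (List.replicate k [a, b])).take cs.length := by
    rw [hlen, PySem.List.slice_to _ (by positivity), Int.toNat_natCast]
  rw [hk, hslice]
  -- RHS as a decide of pointwise parity equality
  have hRHS : (cs == (List.flatten (List.replicate k [a, b])).take cs.length) =
      decide (∀ i : Nat, i < cs.length → cs[i]? = some (if i % 2 = 0 then a else b)) := by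
    by_cases hEq : cs = (List.flatten (List.replicate k [a, b])).take cs.length
    · rw [beq_iff_eq.mpr hEq]
      symm; rw [decide_eq_true_iff]
      intro i hi
      have hc := congrArg (fun l => l[i]?) hEq
      simp only [List.getElem?_take] at hc
      rw [hc, if_pos hi, pat_getElem? a b k i, if_pos (by omega)]
    · have hne : (cs == (List.flatten (List.replicate k [a, b])).take cs.length) = false := by
        simp [hEq]
      rw [hne]; symm; rw [decide_eq_false_iff_not]
      intro hq
      apply hEq
      apply List.ext_getElem?
      intro i
      rw [List.getElem?_take]
      by_cases hi : i < cs.length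
      · rw [if_pos hi, pat_getElem? a b k i, if_pos (by omega), hq i hi]
      · rw [if_neg hi, List.getElem?_eq_none (by omega)]
  rw [hRHS]
  -- LHS as a decide of the period-2 condition
  have hLHS : (if PySem.List.len cs = 2 then true
      else checkLoop cs (PySem.List.pyRange 2 (PySem.List.len cs) 1)) =
      decide (∀ i : Nat, 2 ≤ i → i < cs.length → cs[i]? = cs[i - 2]?) := by
    by_cases hn : PySem.List.len cs = 2
    · have hl2 : cs.length = 2 := by rw [hlen] at hn; exact_mod_cast hn
      rw [if_pos hn]
      symm; rw [decide_eq_true_iff]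
      intro i h2i hi; omega
    · rw [if_neg hn]
      by_cases hbt : checkLoop cs (PySem.List.pyRange 2 (PySem.List.len cs) 1) = true
      case neg =>
        have hbv : checkLoop cs (PySem.List.pyRange 2 (PySem.List.len cs) 1) = false :=
          eq_false_of_ne_true hbt
        rw [hbv]; symm; rw [decide_eq_false_iff_not]
        intro hp
        have hT : checkLoop cs (PySem.List.pyRange 2 (PySem.List.len cs) 1) = true := by
          rw [checkLoop_iff]
          intro i hi
          rw [PySem.List.mem_pyRange_one] at hi
          obtain ⟨h2i, hilt⟩ := hi
          have hilt' : i < (cs.length : Int) := by rwa [hlen] at hilt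
          rw [PySem.List.pyGetD_eq_getElem cs ' ' (by omega) hilt',
              PySem.List.pyGetD_eq_getElem cs ' ' (by omega) (by omega)]
          have hlt1 : i.toNat < cs.length := by omega
          have hlt2 : i.toNat - 2 < cs.length := by omega
          have hv := hp i.toNat (by omega) hlt1
          rw [List.getElem?_eq_getElem hlt1, List.getElem?_eq_getElem hlt2] at hv
          exact (Option.some.inj hv).trans
            (getElem_congr_idx (show i.toNat - 2 = (i - 2).toNat by omega))
        rw [hT] at hbv; exact absurd hbv (by simp)
      case pos =>
        have hbv := hbt
        rw [hbv]; symm; rw [decide_eq_true_iff]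
        intro i h2i hi
        have hall := (checkLoop_iff cs _).mp hbv
        have hm : (i : Int) ∈ PySem.List.pyRange 2 (PySem.List.len cs) 1 := by
          rw [PySem.List.mem_pyRange_one]
          refine ⟨by exact_mod_cast h2i, ?_⟩
          rw [hlen]; exact_mod_cast hi
        have hv := hall (i : Int) hm
        rw [PySem.List.pyGetD_eq_getElem cs ' ' (by omega) (by exact_mod_cast hi),
            PySem.List.pyGetD_eq_getElem cs ' ' (by omega) (by omega)] at hv
        have hlt2 : i - 2 < cs.length := by omega
        rw [List.getElem?_eq_getElem hi, List.getElem?_eq_getElem hlt2]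
        exact congrArg some
          ((getElem_congr_idx (show i = ((i : Int)).toNat by omega)).trans
            (hv.trans (getElem_congr_idx (show ((i : Int) - 2).toNat = i - 2 by omega))))
  rw [hLHS, decide_eq_decide]
  exact period_iff_parity cs a b h2 ha' hb'

-- ===== VERDICT (by name: the statement is the Claim_ definition above) =====
theorem check_spec : Claim_equal_check := by
  intro S _ hpre
  unfold Spec_check check check_alt
  simp only []
  have h2 : 2 ≤ S.toList.length := hpre
  by_cases hab : PySem.List.pyGetD S.toList 0 ' ' = PySem.List.pyGetD S.toList 1 ' '
  · simp [hab]
  · rw [if_pos (by simpa using hab)]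
    rw [body_eq S.toList h2]
    simp [hab]
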